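-- pv_equiv track=rewrite | github.com/hapaxe/Python | renamer/defs.py | numbering
-- ===== SOURCE A (Python) =====
-- def numbering( name, nbr ):
--     '''
--     On a base name replace ## by numbering as 01
--     ::
--         example :
--         in name ### with nbr = 1 > 001
--         in name ### with nbr = 5687 > 5687
--         in name ###_## with nbr = 2 > 'invalid_hastTag'
--
--     :param name: The name where found #
--     :type name: string
--
--     :param nbr: The number of current
--     :type nbr: integer
--
--     :return: The name with numbering include
--     :rtype: string
--     '''
--
--     first_hastTag= name.find('#')
--     last_hastTag= name.rfind('#')
--     sub_hastTag= last_hastTag+1 - first_hastTag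
--     nbr_hastTag= name.count('#')
--
--     if not sub_hastTag - nbr_hastTag == 0:
--         return '#_invalid'
--
--     hastTag= ''
--     for i in range( 0, nbr_hastTag):
--         hastTag += '#'
--
--     numbering= ''
--     nbr_zero= nbr_hastTag - len(str(nbr))
--     if nbr_zero <= 0:
--         numbering= str(nbr)
--     else:
--         for i in range( 0, nbr_zero):
--             numbering += '0'
--         numbering += str(nbr)
--
--     return name.replace( hastTag, numbering )
-- ===== SOURCE B (Python) =====
-- def numbering(name, nbr):
--     # one pass: lengths of maximal '#' runs; valid iff exactly one run
--     runs = []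
--     cur = 0
--     for ch in name:
--         if ch == '#':
--             cur += 1
--         else:
--             if cur:
--                 runs.append(cur)
--             cur = 0
--     if cur:
--         runs.append(cur)
--     if len(runs) != 1:
--         return '#_invalid'
--     n = runs[0]
--     s = str(nbr)
--     num = s if n <= len(s) else '0' * (n - len(s)) + s
--     return name.replace('#' * n, num)
-- ===== Notes on version B (the rewrite author's own statement) =====
-- stated objective: alternative
-- what changed: Validity is decided by collecting the lengths of maximal '#' runs in a single explicit state-machine pass and requiring exactly one run, instead of A's find/rfind/count span arithmetic; the '#'-pattern and the zero padding are built with sequence repetition instead of A's character-by-character accumulation loops; it trades A's four C-level string scans for one explicit Python loop.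
import Mathlib
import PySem

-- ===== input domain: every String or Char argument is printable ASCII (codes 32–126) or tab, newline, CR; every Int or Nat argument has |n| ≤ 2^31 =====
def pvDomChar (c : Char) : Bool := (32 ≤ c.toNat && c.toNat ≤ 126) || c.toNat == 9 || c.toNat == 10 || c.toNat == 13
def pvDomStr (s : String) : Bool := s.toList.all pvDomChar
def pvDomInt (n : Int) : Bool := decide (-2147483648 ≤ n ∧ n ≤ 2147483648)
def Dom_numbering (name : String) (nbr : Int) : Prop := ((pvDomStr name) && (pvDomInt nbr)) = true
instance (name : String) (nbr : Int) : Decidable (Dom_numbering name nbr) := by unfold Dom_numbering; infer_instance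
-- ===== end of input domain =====

-- B reframes validity as "exactly one maximal '#' run", found by one state-machine pass,
-- replacing A's find/rfind/count span arithmetic and its character-by-character padding loops (objective: alternative).


-- ===== PORT A =====
-- literal transliteration: find/rfind/count via PySem.Chars, the '#'- and '0'-building
-- `for i in range(0, …)` loops as folds over PySem.List.pyRange, str(nbr) = PySem.Int.toChars
def numbering (name : String) (nbr : Int) : String :=
  let l := name.toList
  let firstHashTag : Int := PySem.Chars.find l ['#']
  let lastHashTag : Int := PySem.Chars.rfind l ['#']
  let subHashTag : Int := lastHashTag + 1 - firstHashTag
  let nbrHashTag : Nat := PySem.Chars.count l ['#']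
  if subHashTag - (nbrHashTag : Int) ≠ 0 then "#_invalid"
  else
    let hashTag : List Char := (PySem.List.pyRange 0 (nbrHashTag : Int) 1).foldl (fun acc _ => acc ++ ['#']) []
    let s := PySem.Int.toChars nbr
    let nbrZero : Int := (nbrHashTag : Int) - (s.length : Int)
    let numb : List Char :=
      if nbrZero ≤ 0 then s
      else ((PySem.List.pyRange 0 nbrZero 1).foldl (fun acc _ => acc ++ ['0']) []) ++ s
    String.ofList (PySem.Chars.replace l hashTag numb)

-- ===== PORT B =====
-- the body of Source B's `for ch in name` loop: state = (lengths of finished runs, current run length)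
def pvStep (st : List Nat × Nat) (ch : Char) : List Nat × Nat :=
  if ch = '#' then (st.1, st.2 + 1)
  else if st.2 ≠ 0 then (st.1 ++ [st.2], 0) else (st.1, st.2)

-- Source B's trailing `if cur: runs.append(cur)` flush
def pvRunsOf (st : List Nat × Nat) : List Nat := if st.2 ≠ 0 then st.1 ++ [st.2] else st.1

def numbering_alt (name : String) (nbr : Int) : String :=
  let st := name.toList.foldl pvStep ([], 0)
  let runs := pvRunsOf st
  if runs.length ≠ 1 then "#_invalid"
  else
    let n := runs.headD 0      -- runs[0]; the branch guard ensures runs ≠ []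
    let s := PySem.Int.toChars nbr
    let numb := if n ≤ s.length then s else List.replicate (n - s.length) '0' ++ s
    String.ofList (PySem.Chars.replace name.toList (List.replicate n '#') numb)

-- ===== PRECONDITION & SPEC =====
def Spec_numbering (name : String) (nbr : Int) (out : String) : Prop := out = numbering_alt name nbr
instance (name : String) (nbr : Int) (out : String) : Decidable (Spec_numbering name nbr out) := by unfold Spec_numbering; infer_instance

-- ===== CLAIM (what is proved, stated in full; the proofs are below) =====
def Claim_equal_numbering : Prop := ∀ (name : String) (nbr : Int), Dom_numbering name nbr → Spec_numbering name nbr (numbering name nbr)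

-- ===== LEMMAS AND PROOFS =====

-- ['#'].isPrefixOf t just inspects the head
theorem pv_prefix_single (t : List Char) : (['#'].isPrefixOf t = true) ↔ t.head? = some '#' := by
  cases t with
  | nil => simp [List.isPrefixOf]
  | cons c t => simp only [List.isPrefixOf, Bool.and_eq_true, beq_iff_eq,
      and_true, List.head?_cons, Option.some.injEq]; exact eq_comm

-- count with the one-character needle ['#'] is List.count
theorem pv_count_go (l : List Char) : ∀ (fuel acc : Nat), l.length ≤ fuel →
    PySem.Chars.count.go ['#'] fuel l acc = acc + l.count '#' := by
  induction l with
  | nil => intro fuel acc _; cases fuel <;> simp [PySem.Chars.count.go]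
  | cons c t ih =>
    intro fuel acc hf
    cases fuel with
    | zero => simp at hf
    | succ f =>
      rw [PySem.Chars.count.go]
      by_cases hc : c = '#'
      · subst hc
        rw [if_pos (by simp)]
        simp only [List.length_singleton, List.drop_succ_cons, List.drop_zero]
        rw [ih f (acc+1) (by simpa using hf)]
        simp; omega
      · rw [if_neg (by simp [Ne.symm hc])]
        rw [ih f acc (by simpa using hf)]
        simp [hc]

theorem pv_count_hash (l : List Char) : PySem.Chars.count l ['#'] = l.count '#' := by
  rw [PySem.Chars.count]
  simp only [List.isEmpty_cons, if_false, Bool.false_eq_true]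
  exact (pv_count_go l l.length 0 le_rfl).trans (by omega)

-- find.go walks to the first '#'
theorem pv_find_go (l : List Char) : ∀ (k : Nat),
    PySem.Chars.find.go ['#'] l k =
      if '#' ∈ l then ((k : Int) + ((l.takeWhile (· ≠ '#')).length : Int)) else -1 := by
  induction l with
  | nil => intro k; simp [PySem.Chars.find.go]
  | cons c t ih =>
    intro k
    rw [PySem.Chars.find.go]
    by_cases hc : c = '#'
    · subst hc
      rw [if_pos (by simp)]
      simp
    · rw [if_neg (by simp [Ne.symm hc]), ih (k+1)]
      by_cases hm : '#' ∈ t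
      · rw [if_pos hm, if_pos (List.mem_cons_of_mem c hm)]
        simp only [List.takeWhile_cons, decide_eq_true_eq, if_pos (show (c ≠ '#') from hc),
          List.length_cons]
        push_cast; ring
      · rw [if_neg hm, if_neg (by simp [hm, Ne.symm hc])]

-- the takeWhile prefix of non-'#' characters ends exactly at the first '#'
theorem pv_takeWhile_len (l : List Char) : ∀ (p : Nat), l[p]? = some '#' →
    (∀ i, i < p → l[i]? ≠ some '#') → (l.takeWhile (· ≠ '#')).length = p := by
  induction l with
  | nil => intro p hp _; simp at hp
  | cons c t ih =>
    intro p hp hmin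
    cases p with
    | zero => simp at hp; simp [hp]
    | succ p =>
      have hc : c ≠ '#' := by
        intro h; exact hmin 0 (Nat.succ_pos p) (by simp [h])
      simp only [List.getElem?_cons_succ] at hp
      rw [List.takeWhile_cons, if_pos (by simp [hc])]
      simp only [List.length_cons]
      rw [ih p hp (fun i hi => by simpa using hmin (i+1) (by omega))]

theorem pv_find_at (l : List Char) (p : Nat) (hp : l[p]? = some '#')
    (hmin : ∀ i, i < p → l[i]? ≠ some '#') : PySem.Chars.find l ['#'] = (p : Int) := by
  rw [PySem.Chars.find, pv_find_go l 0, if_pos (List.mem_of_getElem? hp),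
    pv_takeWhile_len l p hp hmin]
  simp

theorem pv_find_none (l : List Char) (h : '#' ∉ l) : PySem.Chars.find l ['#'] = -1 := by
  rw [PySem.Chars.find, pv_find_go l 0, if_neg h]

-- rfind.go descends to the last '#'
theorem pv_rfind_go_hit (l : List Char) (k : Nat) (h : l[k]? = some '#') :
    PySem.Chars.rfind.go l ['#'] k = (k : Int) := by
  cases k with
  | zero =>
    rw [PySem.Chars.rfind.go, if_pos ((pv_prefix_single l).2 (by simpa [List.head?_eq_getElem?] using h))]
    simp
  | succ j =>
    rw [PySem.Chars.rfind.go, if_pos ((pv_prefix_single _).2 (by simpa [List.head?_drop] using h))]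

theorem pv_rfind_go_desc (l : List Char) : ∀ (j k : Nat), k ≤ j →
    (∀ i, k < i → i ≤ j → l[i]? ≠ some '#') →
    PySem.Chars.rfind.go l ['#'] j = PySem.Chars.rfind.go l ['#'] k := by
  intro j
  induction j with
  | zero => intro k hk _; interval_cases k; rfl
  | succ j ih =>
    intro k hk habove
    rcases Nat.eq_or_lt_of_le hk with h | h
    · rw [h]
    · have hne : l[j+1]? ≠ some '#' := habove (j+1) (by omega) le_rfl
      rw [PySem.Chars.rfind.go, if_neg (by
        intro hp
        exact hne (by simpa [List.head?_drop] using (pv_prefix_single _).1 hp))]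
      exact ih k (by omega) (fun i h1 h2 => habove i h1 (by omega))

theorem pv_rfind_at (l : List Char) (q : Nat) (hq : l[q]? = some '#')
    (hmax : ∀ i, q < i → l[i]? ≠ some '#') : PySem.Chars.rfind l ['#'] = (q : Int) := by
  rw [PySem.Chars.rfind]
  rw [pv_rfind_go_desc l l.length q (by rcases List.getElem?_eq_some_iff.1 hq with ⟨h,_⟩; omega)
    (fun i h1 _ => hmax i h1)]
  exact pv_rfind_go_hit l q hq

theorem pv_rfind_none (l : List Char) (h : '#' ∉ l) : PySem.Chars.rfind l ['#'] = -1 := by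
  rw [PySem.Chars.rfind]
  rw [pv_rfind_go_desc l l.length 0 (Nat.zero_le _) (fun i _ _ hi => h (List.mem_of_getElem? hi))]
  rw [PySem.Chars.rfind.go, if_neg (by
    intro hp
    exact h (List.mem_of_getElem? (by
      simpa [List.head?_eq_getElem?] using (pv_prefix_single _).1 hp)))]

-- A's character-appending `for i in range(0, m)` loops build a replicate
theorem pv_build (z : Int) (c : Char) :
    (PySem.List.pyRange 0 z 1).foldl (fun acc _ => acc ++ [c]) [] = List.replicate z.toNat c := by
  have key : ∀ (r : List Int) (acc : List Char),
      r.foldl (fun acc _ => acc ++ [c]) acc = acc ++ List.replicate r.length c := by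
    intro r
    induction r with
    | nil => intro acc; simp
    | cons x t ih =>
      intro acc
      rw [List.foldl_cons, ih]
      rw [List.length_cons, List.replicate_succ', List.append_assoc,
        ← List.replicate_succ', List.singleton_append, ← List.replicate_succ]
  rw [key, PySem.List.length_pyRange_one]
  simp

-- B's fold: single-step evaluations
theorem pvStep_hash (rs : List Nat) (cur : Nat) : pvStep (rs, cur) '#' = (rs, cur + 1) := by
  simp [pvStep]

theorem pvStep_flush (rs : List Nat) (cur : Nat) (c : Char) (hc : c ≠ '#') (h0 : cur ≠ 0) :
    pvStep (rs, cur) c = (rs ++ [cur], 0) := by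
  simp [pvStep, hc, h0]

theorem pvStep_skip (rs : List Nat) (c : Char) (hc : c ≠ '#') :
    pvStep (rs, 0) c = (rs, 0) := by
  simp [pvStep, hc]

theorem pv_foldl_nohash (t : List Char) : ∀ (rs : List Nat), '#' ∉ t →
    t.foldl pvStep (rs, 0) = (rs, 0) := by
  induction t with
  | nil => intro rs _; rfl
  | cons c t ih =>
    intro rs h
    simp only [List.mem_cons, not_or] at h
    rw [List.foldl_cons, pvStep_skip rs c (fun hh => h.1 (Eq.symm hh))]
    exact ih rs h.2

theorem pv_foldl_hashes (n : Nat) (b : List Char) (rs : List Nat) : ∀ (cur : Nat),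
    (List.replicate n '#' ++ b).foldl pvStep (rs, cur) = b.foldl pvStep (rs, cur + n) := by
  induction n with
  | zero => simp
  | succ n ih =>
    intro cur
    rw [List.replicate_succ, List.cons_append, List.foldl_cons, pvStep_hash, ih (cur+1)]
    ring_nf

theorem pv_foldl_len (t : List Char) : ∀ (rs : List Nat) (cur : Nat),
    rs.length ≤ (pvRunsOf (t.foldl pvStep (rs, cur))).length := by
  induction t with
  | nil =>
    intro rs cur
    by_cases h : cur = 0 <;> simp [pvRunsOf, h]
  | cons c t ih =>
    intro rs cur
    rw [List.foldl_cons]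
    by_cases hc : c = '#'
    · rw [hc, pvStep_hash]; exact ih rs (cur+1)
    · by_cases h0 : cur = 0
      · rw [h0, pvStep_skip rs c hc]; exact ih rs 0
      · rw [pvStep_flush rs cur c hc h0]
        calc rs.length ≤ (rs ++ [cur]).length := by simp
          _ ≤ _ := ih (rs ++ [cur]) 0

theorem pv_foldl_len_hit (t : List Char) : ∀ (rs : List Nat) (cur : Nat), ('#' ∈ t ∨ cur ≠ 0) →
    rs.length + 1 ≤ (pvRunsOf (t.foldl pvStep (rs, cur))).length := by
  induction t with
  | nil =>
    intro rs cur h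
    rcases h with h | h
    · simp at h
    · simp [pvRunsOf, h]
  | cons c t ih =>
    intro rs cur h
    rw [List.foldl_cons]
    by_cases hc : c = '#'
    · rw [hc, pvStep_hash]; exact ih rs (cur+1) (Or.inr (Nat.succ_ne_zero cur))
    · by_cases h0 : cur = 0
      · have ht : '#' ∈ t := by
          rcases h with hm | hm
          · rcases List.mem_cons.1 hm with he | he
            · exact absurd (Eq.symm he) hc
            · exact he
          · exact absurd h0 hm
        rw [h0, pvStep_skip rs c hc]
        exact ih rs 0 (Or.inl ht)
      · rw [pvStep_flush rs cur c hc h0]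
        calc rs.length + 1 = (rs ++ [cur]).length := by simp
          _ ≤ _ := pv_foldl_len t (rs ++ [cur]) 0

-- the two programs agree on every input
-- the head surviving dropWhile fails the predicate
theorem pv_head?_dropWhile {p : Char → Bool} : ∀ (l : List Char) (x : Char),
    (l.dropWhile p).head? = some x → p x = false := by
  intro l
  induction l with
  | nil => intro x h; simp at h
  | cons c t ih =>
    intro x h
    by_cases hc : p c
    · rw [List.dropWhile_cons_of_pos hc] at h
      exact ih x h
    · rw [List.dropWhile_cons_of_neg hc, List.head?_cons] at h
      rw [← Option.some.inj h]
      exact Bool.eq_false_iff.2 hc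

-- split off the LAST '#' of a list that contains one
theorem pv_last_split (b : List Char) (h : '#' ∈ b) :
    ∃ c d, b = c ++ '#' :: d ∧ '#' ∉ d := by
  induction b using List.reverseRecOn with
  | nil => simp at h
  | append_singleton u x ih =>
    by_cases hx : x = '#'
    · exact ⟨u, [], by rw [hx], by simp⟩
    · have hu : '#' ∈ u := by
        rcases List.mem_append.1 h with h1 | h1
        · exact h1
        · simp only [List.mem_singleton] at h1
          exact absurd h1.symm hx
      obtain ⟨c, d, hcd, hd⟩ := ih hu
      refine ⟨c, d ++ [x], by rw [hcd]; simp, ?_⟩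
      intro hm
      rcases List.mem_append.1 hm with h1 | h1
      · exact hd h1
      · simp only [List.mem_singleton] at h1
        exact hx h1.symm

-- the success branches agree once the run length n is known
theorem pv_success (l : List Char) (nbr : Int) (n : Nat) :
    String.ofList (PySem.Chars.replace l
      ((PySem.List.pyRange 0 (n:Int) 1).foldl (fun acc _ => acc ++ ['#']) [])
      (if (n:Int) - ((PySem.Int.toChars nbr).length : Int) ≤ 0 then PySem.Int.toChars nbr
       else ((PySem.List.pyRange 0 ((n:Int) - ((PySem.Int.toChars nbr).length:Int)) 1).foldl
          (fun acc _ => acc ++ ['0']) []) ++ PySem.Int.toChars nbr)) =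
    String.ofList (PySem.Chars.replace l (List.replicate n '#')
      (if n ≤ (PySem.Int.toChars nbr).length then PySem.Int.toChars nbr
       else List.replicate (n - (PySem.Int.toChars nbr).length) '0' ++ PySem.Int.toChars nbr)) := by
  rw [pv_build]
  congr 2
  by_cases hle : n ≤ (PySem.Int.toChars nbr).length
  · rw [if_pos (by omega), if_pos hle]
  · rw [if_neg (by omega), if_neg hle, pv_build]
    congr 2
    omega

theorem pv_main (name : String) (nbr : Int) : numbering name nbr = numbering_alt name nbr := by
  simp only [numbering, numbering_alt]
  by_cases hmem : '#' ∈ name.toList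
  · -- decompose: name.toList = a ++ replicate n '#' ++ b, '#' ∉ a, 0 < n, b does not start with '#'
    obtain ⟨a, n, b, hl, ha, hn, hbh⟩ :
        ∃ (a : List Char) (n : Nat) (b : List Char),
          name.toList = a ++ (List.replicate n '#' ++ b) ∧ '#' ∉ a ∧ 0 < n ∧
          b.head? ≠ some '#' := by
      refine ⟨(name.toList).takeWhile (· ≠ '#'),
        (((name.toList).dropWhile (· ≠ '#')).takeWhile (· = '#')).length,
        ((name.toList).dropWhile (· ≠ '#')).dropWhile (· = '#'), ?_, ?_, ?_, ?_⟩
      · conv_lhs => rw [← List.takeWhile_append_dropWhile (p := fun x => decide (x ≠ '#')) (l := name.toList)]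
        congr 1
        conv_lhs => rw [← List.takeWhile_append_dropWhile (p := fun x => decide (x = '#'))
          (l := (name.toList).dropWhile (· ≠ '#'))]
        congr 1
        exact List.eq_replicate_iff.2 ⟨rfl, fun x hx => by simpa using List.mem_takeWhile_imp hx⟩
      · intro hmm
        simpa using List.mem_takeWhile_imp hmm
      · have hne : (name.toList).dropWhile (· ≠ '#') ≠ [] := by
          intro h0
          have : name.toList = (name.toList).takeWhile (· ≠ '#') := by
            conv_lhs => rw [← List.takeWhile_append_dropWhile (p := fun x => decide (x ≠ '#')) (l := name.toList)]
            rw [h0, List.append_nil]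
          rw [this] at hmem
          simpa using List.mem_takeWhile_imp hmem
        have hhd := List.head_dropWhile_not (fun x => decide (x ≠ '#')) hne
        simp only [decide_eq_false_iff_not, not_not] at hhd
        have hhq : ((name.toList).dropWhile (· ≠ '#')).head? = some '#' := by
          rw [List.head?_eq_some_head hne, hhd]
        cases hcons : (name.toList).dropWhile (· ≠ '#') with
        | nil => exact absurd hcons hne
        | cons c t =>
          rw [hcons] at hhq
          simp only [List.head?_cons, Option.some.injEq] at hhq
          rw [List.takeWhile_cons, if_pos (by simp [hhq])]
          simp
      · intro hcontra
        have := pv_head?_dropWhile _ _ hcontra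
        simp at this
    -- common facts
    have hidx : ∀ j : Nat, name.toList[a.length + j]? = (List.replicate n '#' ++ b)[j]? := by
      intro j
      rw [hl, List.getElem?_append_right (Nat.le_add_right _ _), Nat.add_sub_cancel_left]
    have hidx2 : ∀ j, j < n → name.toList[a.length + j]? = some '#' := by
      intro j hj
      rw [hidx j, List.getElem?_append_left (by simpa using hj), List.getElem?_replicate, if_pos hj]
    have hfind : PySem.Chars.find name.toList ['#'] = (a.length : Int) := by
      apply pv_find_at
      · simpa using hidx2 0 hn
      · intro i hi hc
        rw [hl, List.getElem?_append_left hi] at hc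
        exact ha (List.mem_of_getElem? hc)
    have hcount : name.toList.count '#' = n + b.count '#' := by
      rw [hl]
      simp [List.count_append, List.count_eq_zero.2 ha]
    by_cases hbm : '#' ∈ b
    · -- more than one run: both sides return "#_invalid"
      obtain ⟨c, d, hbcd, hd⟩ := pv_last_split b hbm
      have hbne : b ≠ [] := by rw [hbcd]; simp
      have hcne : c ≠ [] := by
        intro h0
        exact hbh (by rw [hbcd, h0, List.nil_append, List.head?_cons])
      obtain ⟨c0, c', hc'⟩ := List.exists_cons_of_ne_nil hcne
      have hc0 : c0 ≠ '#' := by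
        intro hcontra
        exact hbh (by rw [hbcd, hc', List.cons_append, List.head?_cons, hcontra])
      have hccount : List.count '#' c < c.length := by
        have hcc : List.count '#' c = List.count '#' c' := by
          rw [hc']; simp [hc0]
        rw [hcc, hc']
        calc List.count '#' c' ≤ c'.length := List.count_le_length
          _ < (c0 :: c').length := by simp
      have hrfind : PySem.Chars.rfind name.toList ['#'] = ((a.length + (n + c.length) : Nat) : Int) := by
        apply pv_rfind_at
        · rw [hidx (n + c.length), List.getElem?_append_right (by simp),
            List.length_replicate, Nat.add_sub_cancel_left, hbcd,
            List.getElem?_append_right le_rfl, Nat.sub_self]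
          simp
        · intro i hi hc2
          rw [hl, List.getElem?_append_right (by omega)] at hc2
          rw [List.getElem?_append_right (by simp; omega)] at hc2
          rw [hbcd, List.getElem?_append_right (by simp; omega)] at hc2
          rw [List.length_replicate] at hc2
          rw [show i - a.length - n - c.length = (i - a.length - n - c.length - 1) + 1 by omega,
            List.getElem?_cons_succ] at hc2
          exact hd (List.mem_of_getElem? hc2)
      have hcb : List.count '#' b = List.count '#' c + 1 := by
        rw [hbcd]
        simp [List.count_append, List.count_eq_zero.2 hd]
      rw [hfind, hrfind, pv_count_hash, hcount, hcb]
      rw [if_pos (by push_cast; omega)]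
      -- B sees at least two runs
      have hlen2 : 2 ≤ (pvRunsOf (name.toList.foldl pvStep ([], 0))).length := by
        rw [hl, List.foldl_append, pv_foldl_nohash a [] ha, pv_foldl_hashes, Nat.zero_add]
        rw [hbcd, hc', List.cons_append, List.foldl_cons,
          pvStep_flush [] n c0 hc0 (by omega), List.nil_append]
        exact pv_foldl_len_hit (c' ++ '#' :: d) [n] 0 (Or.inl (by simp))
      rw [if_pos (by omega)]
    · -- exactly one run: both sides take the success branch with the same n
      have hrfind : PySem.Chars.rfind name.toList ['#'] = ((a.length + (n-1) : Nat) : Int) := by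
        apply pv_rfind_at
        · exact hidx2 (n-1) (by omega)
        · intro i hi hc
          rw [hl, List.getElem?_append_right (by omega)] at hc
          rw [List.getElem?_append_right (by simp; omega)] at hc
          exact hbm (List.mem_of_getElem? hc)
      rw [hfind, hrfind, pv_count_hash, hcount, List.count_eq_zero.2 hbm, Nat.add_zero]
      rw [if_neg (by push_cast; omega)]
      -- B's state machine
      have hst : name.toList.foldl pvStep ([], 0) =
          (if b = [] then (([] : List Nat), n) else ([n], 0)) := by
        rw [hl, List.foldl_append, pv_foldl_nohash a [] ha, pv_foldl_hashes]
        cases hb : b with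
        | nil => simp
        | cons c0 t =>
          have hc0 : c0 ≠ '#' := by
            intro hcontra
            exact hbh (by rw [hb, List.head?_cons, hcontra])
          have hnt : '#' ∉ t := fun hmm => hbm (by rw [hb]; exact List.mem_cons_of_mem c0 hmm)
          rw [List.foldl_cons, Nat.zero_add, pvStep_flush [] n c0 hc0 (by omega),
            List.nil_append, pv_foldl_nohash t [n] hnt]
          simp
      rw [hst]
      by_cases hb : b = []
      · rw [if_pos hb]
        have h2 : (((([]:List Nat), n)).2 ≠ 0) := by simpa using hn.ne'
        conv_rhs => simp only [pvRunsOf, if_pos h2]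
        exact pv_success name.toList nbr n
      · rw [if_neg hb]
        exact pv_success name.toList nbr n
  · -- no '#): A's guard value is 1, B sees no runs: both "#_invalid"
    rw [pv_find_none _ hmem, pv_rfind_none _ hmem, pv_count_hash,
      List.count_eq_zero.2 hmem, pv_foldl_nohash _ _ hmem]
    norm_num [pvRunsOf]

-- ===== VERDICT (by name: the statement is the Claim_ definition above) =====
theorem numbering_spec : Claim_equal_numbering := by
  intro name nbr _
  unfold Spec_numbering
  exact pv_main name nbr
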